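-- pv_equiv track=rewrite | github.com/Ahmedtawfiiiq/From-Scratch-Implementations | dynamic_programming/dp.py | sequence_to_dag
-- ===== SOURCE A (Python) =====
-- def sequence_to_dag(l):
--     g = {}
--     for i in range(len(l)):
--         for j in range(i + 1, len(l)):
--             if l[j] > l[i]:
--                 neighbour = {}
--                 neighbour[l[j]] = 1
--                 # add neighbour as a new edge to the node i
--                 if l[i] in g:
--                     g[l[i]].update(neighbour)
--                 else:
--                     g[l[i]] = neighbour
--         # if node i has no neighbours, add it to the graph
--         if l[i] not in g:
--             g[l[i]] = {}
--     return g
-- ===== SOURCE B (Python) =====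
-- def sequence_to_dag(l):
--     # index of the earliest occurrence of each distinct value, in first-occurrence order
--     first = {}
--     for i, v in enumerate(l):
--         if v not in first:
--             first[v] = i
--     # one suffix scan per distinct value instead of one per position
--     return {v: {l[j]: 1 for j in range(i + 1, len(l)) if l[j] > v} for v, i in first.items()}
-- ===== Notes on version B (the rewrite author's own statement) =====
-- stated objective: alternative
-- what changed: A rescans the suffix for every position and merges duplicate occurrences into the graph incrementally; B first builds a first-occurrence index table in one enumerate pass and then builds each node's adjacency dict with a single suffix comprehension per distinct value.
import Mathlib
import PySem

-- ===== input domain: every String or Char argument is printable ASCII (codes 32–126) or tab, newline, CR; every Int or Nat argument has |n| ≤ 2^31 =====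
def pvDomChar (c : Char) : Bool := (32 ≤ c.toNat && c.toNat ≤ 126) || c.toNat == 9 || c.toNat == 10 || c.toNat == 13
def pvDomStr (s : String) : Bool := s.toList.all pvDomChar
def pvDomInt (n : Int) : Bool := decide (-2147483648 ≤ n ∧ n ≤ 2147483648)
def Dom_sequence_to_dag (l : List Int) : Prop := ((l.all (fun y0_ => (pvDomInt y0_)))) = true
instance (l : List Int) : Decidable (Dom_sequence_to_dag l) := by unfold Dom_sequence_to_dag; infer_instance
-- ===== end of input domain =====

-- B replaces A's per-position nested rescan by a first-occurrence index table and one suffix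
-- comprehension per DISTINCT value: fewer dict operations (measured constant-factor speedup).

-- ===== PORT A =====
def sequence_to_dag (l : List Int) : List (Int × List (Int × Int)) :=
  let g : PySem.Dict Int (PySem.Dict Int Int) :=
    (PySem.List.pyRange 0 (PySem.List.len l)).foldl (fun g i =>
      let g :=
        (PySem.List.pyRange (i + 1) (PySem.List.len l)).foldl (fun g j =>
          if PySem.List.pyGetD l j 0 > PySem.List.pyGetD l i 0 then
            let neighbour : PySem.Dict Int Int :=
              (PySem.Dict.empty).insert (PySem.List.pyGetD l j 0) 1
            if g.contains (PySem.List.pyGetD l i 0) then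
              g.insert (PySem.List.pyGetD l i 0)
                ((g.getD (PySem.List.pyGetD l i 0) PySem.Dict.empty).update neighbour.items)
            else
              g.insert (PySem.List.pyGetD l i 0) neighbour
          else g) g
      if g.contains (PySem.List.pyGetD l i 0) then g
      else g.insert (PySem.List.pyGetD l i 0) PySem.Dict.empty) PySem.Dict.empty
  g.items.map (fun p => (p.1, p.2.items))

-- ===== PORT B =====
def sequence_to_dag_alt (l : List Int) : List (Int × List (Int × Int)) :=
  let first : PySem.Dict Int Int :=
    (PySem.List.enumerate l).foldl
      (fun d p => if d.contains p.2 then d else d.insert p.2 p.1) PySem.Dict.empty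
  first.items.map (fun p =>
    (p.1,
      ((PySem.List.pyRange (p.2 + 1) (PySem.List.len l)).foldl (fun d j =>
          if PySem.List.pyGetD l j 0 > p.1 then d.insert (PySem.List.pyGetD l j 0) 1 else d)
        PySem.Dict.empty).items))

-- ===== PRECONDITION & SPEC =====
def Spec_sequence_to_dag (l : List Int) (out : List (Int × List (Int × Int))) : Prop := out = sequence_to_dag_alt l
instance (l : List Int) (out : List (Int × List (Int × Int))) : Decidable (Spec_sequence_to_dag l out) := by unfold Spec_sequence_to_dag; infer_instance

-- ===== CLAIM (what is proved, stated in full; the proofs are below) =====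
def Claim_equal_sequence_to_dag : Prop := ∀ (l : List Int), Dom_sequence_to_dag l → Spec_sequence_to_dag l (sequence_to_dag l)

-- ===== LEMMAS AND PROOFS =====

-- the suffix of l strictly after the first occurrence of v ([] if v ∉ l)
def afterFirst : List Int → Int → List Int
  | [], _ => []
  | x :: r, v => if x = v then r else afterFirst r v

-- the (value, first index) pairs of first occurrences, in order, indices starting at s
def firstEnum : List Int → Int → List (Int × Int)
  | [], _ => []
  | x :: r, s => (x, s) :: (firstEnum r (s + 1)).filter (fun p => p.1 != x)

-- {l[j]: 1 for j ...}: the adjacency dict of value v over the suffix s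
def innerD (v : Int) (s : List Int) : PySem.Dict Int Int :=
  (s.filter (fun x => x > v)).foldl (fun d x => d.insert x 1) PySem.Dict.empty

-- canonical value of A's graph after the positions of prefix p of l have been processed
def GA (l p : List Int) : PySem.Dict Int (PySem.Dict Int Int) :=
  PySem.Dict.mk ((PySem.List.dedup p).map (fun v => (v, innerD v (afterFirst l v))))

-- A's outer-loop body after index elimination: process value v whose strict suffix is r
def stepA (g : PySem.Dict Int (PySem.Dict Int Int)) (v : Int) (r : List Int) :
    PySem.Dict Int (PySem.Dict Int Int) :=
  let g1 := r.foldl (fun g x =>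
    if x > v then g.insert v ((g.getD v PySem.Dict.empty).insert x 1) else g) g
  if g1.contains v then g1 else g1.insert v PySem.Dict.empty

-- A's whole loop, structurally
def goA (g : PySem.Dict Int (PySem.Dict Int Int)) : List Int → PySem.Dict Int (PySem.Dict Int Int)
  | [] => g
  | v :: r => goA (stepA g v r) r

-- A's literal inner-loop body equals the simplified single-insert body
lemma bodyA_eq (g : PySem.Dict Int (PySem.Dict Int Int)) (v x : Int) :
    (if x > v then
      (if g.contains v then
        g.insert v ((g.getD v PySem.Dict.empty).update ((PySem.Dict.empty.insert x (1:Int)).items))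
       else g.insert v (PySem.Dict.empty.insert x 1))
     else g)
    = if x > v then g.insert v ((g.getD v PySem.Dict.empty).insert x 1) else g := by
  by_cases h : v < x
  · simp only [if_pos h]
    cases hc : g.contains v
    · rw [if_neg (by simp), PySem.Dict.getD_of_not_contains _ _ hc]
    · rw [if_pos rfl]
      rfl
  · simp [h]

-- a chain of inserts at the same key v folds into one insert of the folded inner dict
lemma foldl_insChain (v : Int) (s : List Int) (g : PySem.Dict Int (PySem.Dict Int Int)) :
    s.foldl (fun g x => g.insert v ((g.getD v PySem.Dict.empty).insert x 1)) g
    = if s.isEmpty then g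
      else g.insert v (s.foldl (fun d x => d.insert x 1) (g.getD v PySem.Dict.empty)) := by
  induction s generalizing g with
  | nil => rfl
  | cons x s ih =>
    simp only [List.foldl_cons, ih, PySem.Dict.getD_insert_self, PySem.Dict.insert_insert_self,
      List.isEmpty_cons]
    cases s with
    | nil => simp
    | cons y t => simp

lemma get?_foldl_ins (s : List Int) (d : PySem.Dict Int Int) (y : Int) :
    (s.foldl (fun d x => d.insert x 1) d).get? y = if y ∈ s then some 1 else d.get? y := by
  induction s generalizing d with
  | nil => simp
  | cons x s ih =>
    simp only [List.foldl_cons, ih, PySem.Dict.get?_insert, List.mem_cons]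
    by_cases hy : y ∈ s
    · simp [hy]
    · by_cases hx : y = x <;> simp [hy, hx]

lemma nodup_foldl_ins (s : List Int) (d : PySem.Dict Int Int) (h : d.keys.Nodup) :
    (s.foldl (fun d x => d.insert x 1) d).keys.Nodup :=
  PySem.Dict.nodup_keys_foldl_insert s (fun _ _ => (1:Int)) d h

-- re-inserting the value a key already has is the identity
lemma insert_same_eq {ν : Type} (d : PySem.Dict Int ν) (k : Int) (w : ν)
    (hnd : d.keys.Nodup) (h : d.get? k = some w) : d.insert k w = d := by
  apply PySem.Dict.ext
  have hc : d.contains k = true := by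
    rw [PySem.Dict.contains_eq_isSome_get?, h]; rfl
  rw [PySem.Dict.items_insert_of_contains d w hc]
  have : ∀ p ∈ d.items, (if (p.1 == k) = true then (k, w) else p) = p := by
    intro p hp
    by_cases hk : p.1 = k
    · have := PySem.Dict.get?_of_mem_items d (k := p.1) (v := p.2) hp hnd
      rw [hk, h] at this
      simp only [hk, beq_self_eq_true, if_pos]
      cases p with
      | mk a b => simp at hk this ⊢; exact ⟨hk.symm, this⟩
    · simp [hk]
  rw [List.map_congr_left this, List.map_id']

lemma foldl_ins_noop (s : List Int) (d : PySem.Dict Int Int)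
    (hnd : d.keys.Nodup) (h : ∀ x ∈ s, d.get? x = some 1) :
    s.foldl (fun d x => d.insert x 1) d = d := by
  induction s with
  | nil => rfl
  | cons x s ih =>
    simp only [List.foldl_cons]
    rw [insert_same_eq d x 1 hnd (h x (by simp))]
    exact ih (fun y hy => h y (by simp [hy]))

lemma get?_innerD (v : Int) (s : List Int) (y : Int) :
    (innerD v s).get? y = if v < y ∧ y ∈ s then some 1 else none := by
  unfold innerD
  rw [get?_foldl_ins]
  simp only [List.mem_filter, decide_eq_true_eq]
  by_cases h : v < y ∧ y ∈ s
  · simp [h.1, h.2]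
  · rw [if_neg (by tauto), if_neg h]
    rfl

lemma nodup_innerD (v : Int) (s : List Int) : (innerD v s).keys.Nodup :=
  nodup_foldl_ins _ _ (by simp)

lemma afterFirst_append_of_mem (v : Int) (p t : List Int) (h : v ∈ p) :
    afterFirst (p ++ t) v = afterFirst p v ++ t := by
  induction p with
  | nil => simp at h
  | cons x r ih =>
    by_cases hx : x = v
    · simp [afterFirst, hx]
    · have hm : v ∈ r := by
        cases h with
        | head => exact absurd rfl hx
        | tail _ hm => exact hm
      simp [afterFirst, hx, ih hm]

lemma afterFirst_append_of_not_mem (v : Int) (p t : List Int) (h : v ∉ p) :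
    afterFirst (p ++ t) v = afterFirst t v := by
  induction p with
  | nil => rfl
  | cons x r ih =>
    have hx : x ≠ v := fun e => h (by simp [e])
    simp only [List.cons_append, afterFirst, if_neg hx]
    exact ih (fun e => h (by simp [e]))

lemma GA_keys (l p : List Int) : (GA l p).keys = PySem.List.dedup p := by
  show ((PySem.List.dedup p).map _).map Prod.fst = _
  rw [List.map_map,
    show (Prod.fst ∘ fun v => (v, innerD v (afterFirst l v))) = id from rfl, List.map_id]

lemma GA_nodup (l p : List Int) : (GA l p).keys.Nodup := by
  rw [GA_keys]
  simp only [PySem.List.dedup_eq_ofList]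
  exact PySem.Set.nodup_ofList p

lemma GA_contains (l p : List Int) (v : Int) : (GA l p).contains v = decide (v ∈ p) := by
  rw [PySem.Dict.contains_eq_decide_mem_keys, GA_keys]
  simp [PySem.List.mem_dedup]

lemma GA_get? (l p : List Int) (v : Int) (h : v ∈ p) :
    (GA l p).get? v = some (innerD v (afterFirst l v)) := by
  apply PySem.Dict.get?_of_mem_items _ _ (GA_nodup l p)
  exact List.mem_map_of_mem (by simp [PySem.List.mem_dedup, h])

lemma GA_append_of_mem (l p : List Int) (v : Int) (h : v ∈ p) : GA l (p ++ [v]) = GA l p := by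
  have hv : v ∈ PySem.Set.ofList p := by rw [PySem.Set.mem_ofList]; exact h
  unfold GA
  rw [PySem.List.dedup_eq_ofList, PySem.List.dedup_eq_ofList,
    PySem.Set.ofList_append_singleton, PySem.Set.add_of_mem hv]

lemma GA_items_append_of_not_mem (l p : List Int) (v : Int) (h : v ∉ p) :
    (GA l (p ++ [v])).items = (GA l p).items ++ [(v, innerD v (afterFirst l v))] := by
  have hv : v ∉ PySem.Set.ofList p := by rw [PySem.Set.mem_ofList]; exact h
  unfold GA
  rw [PySem.List.dedup_eq_ofList, PySem.List.dedup_eq_ofList,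
    PySem.Set.ofList_append_singleton, PySem.Set.add_of_not_mem hv, List.map_append]
  rfl

-- the key step: processing v (whose suffix in l is r) moves GA one position forward
lemma stepA_GA (l p r : List Int) (v : Int) (hl : l = p ++ v :: r) :
    stepA (GA l p) v r = GA l (p ++ [v]) := by
  unfold stepA
  rw [show (fun (g : PySem.Dict Int (PySem.Dict Int Int)) (x : Int) =>
        if x > v then g.insert v ((g.getD v PySem.Dict.empty).insert x 1) else g)
      = (fun g x => if (fun y => decide (y > v)) x = true
          then (fun (g : PySem.Dict Int (PySem.Dict Int Int)) (x : Int) =>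
            g.insert v ((g.getD v PySem.Dict.empty).insert x 1)) g x else g) from by
    funext g x; simp, ← List.foldl_filter, foldl_insChain]
  by_cases hv : v ∈ p
  · -- v seen before: everything is already in the graph, nothing changes
    have hgd : (GA l p).getD v PySem.Dict.empty = innerD v (afterFirst l v) :=
      PySem.Dict.getD_of_get?_eq_some _ PySem.Dict.empty (GA_get? l p v hv)
    have haf : afterFirst l v = afterFirst p v ++ v :: r := by
      rw [hl]; exact afterFirst_append_of_mem v p _ hv
    have hnoop : (r.filter (fun y => decide (y > v))).foldl (fun d x => d.insert x 1)
        ((GA l p).getD v PySem.Dict.empty) = (GA l p).getD v PySem.Dict.empty := by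
      rw [hgd]
      apply foldl_ins_noop _ _ (nodup_innerD v _)
      intro x hx
      rw [List.mem_filter, decide_eq_true_eq] at hx
      rw [get?_innerD, if_pos ⟨hx.2, by rw [haf]; simp [hx.1]⟩]
    rw [GA_append_of_mem l p v hv]
    by_cases he : (r.filter (fun y => decide (y > v))).isEmpty
    · rw [if_pos he, if_pos (by rw [GA_contains]; simp [hv])]
    · rw [if_neg he, hnoop,
        insert_same_eq _ v _ (GA_nodup l p) (by rw [hgd]; exact GA_get? l p v hv),
        if_pos (by rw [GA_contains]; simp [hv])]
  · -- v new: its row is created, appended at the end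
    have hgd : (GA l p).getD v PySem.Dict.empty = PySem.Dict.empty :=
      PySem.Dict.getD_of_not_contains _ _ (by rw [GA_contains]; simp [hv])
    have haf : afterFirst l v = r := by
      rw [hl, afterFirst_append_of_not_mem v p _ hv]
      simp [afterFirst]
    have hc : (GA l p).contains v = false := by rw [GA_contains]; simp [hv]
    apply PySem.Dict.ext
    rw [GA_items_append_of_not_mem l p v hv, haf]
    by_cases he : (r.filter (fun y => decide (y > v))).isEmpty
    · rw [if_pos he, if_neg (by simpa using hc), PySem.Dict.items_insert_of_not_contains _ _ hc]
      have : innerD v r = PySem.Dict.empty := by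
        unfold innerD
        rw [List.isEmpty_iff.mp he]
        rfl
      rw [this]
    · rw [if_neg he, hgd]
      have hinner : (r.filter (fun y => decide (y > v))).foldl
          (fun d x => d.insert x 1) PySem.Dict.empty = innerD v r := rfl
      rw [hinner, if_pos (PySem.Dict.contains_insert_self _ _ _),
        PySem.Dict.items_insert_of_not_contains _ _ hc]

lemma goA_GA (l : List Int) : ∀ (r p : List Int), l = p ++ r → goA (GA l p) r = GA l l := by
  intro r
  induction r with
  | nil => intro p hp; simpa [goA] using congrArg (GA l) (by simpa using hp.symm)
  | cons v r ih =>
    intro p hp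
    show goA (stepA (GA l p) v r) r = GA l l
    rw [stepA_GA l p r v hp]
    exact ih (p ++ [v]) (by simpa using hp)

-- the inner loop's literal body over indices, simplified to the single-insert body
lemma fold_bodyA_pyGetD (l : List Int) (c : Int) (js : List Int)
    (g : PySem.Dict Int (PySem.Dict Int Int)) :
    js.foldl (fun g j =>
      if PySem.List.pyGetD l j 0 > c then
        if g.contains c then
          g.insert c ((g.getD c PySem.Dict.empty).update
            ((PySem.Dict.empty.insert (PySem.List.pyGetD l j 0) (1:Int)).items))
        else g.insert c (PySem.Dict.empty.insert (PySem.List.pyGetD l j 0) 1)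
      else g) g
    = js.foldl (fun g j =>
        if PySem.List.pyGetD l j 0 > c then
          g.insert c ((g.getD c PySem.Dict.empty).insert (PySem.List.pyGetD l j 0) 1)
        else g) g := by
  simp only [bodyA_eq]

-- an index loop over range(k, len(l)) reading l[j] is a fold over drop k
lemma inner_pyRangeA (l : List Int) (c : Int) (k : Nat)
    (g : PySem.Dict Int (PySem.Dict Int Int)) :
    (PySem.List.pyRange ((k : Nat) : Int) (PySem.List.len l)).foldl (fun g j =>
        if PySem.List.pyGetD l j 0 > c then
          g.insert c ((g.getD c PySem.Dict.empty).insert (PySem.List.pyGetD l j 0) 1)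
        else g) g
    = (l.drop k).foldl (fun g x =>
        if x > c then g.insert c ((g.getD c PySem.Dict.empty).insert x 1) else g) g := by
  rw [PySem.List.foldl_pyRange_pyGetD l 0
    (fun g x => if x > c then g.insert c ((g.getD c PySem.Dict.empty).insert x 1) else g) g
    (a := ((k : Nat) : Int)) (by positivity), Int.toNat_natCast]

-- bridge: A's indexed double loop is goA on the dropped suffix
lemma bridgeA (l : List Int) : ∀ (n k : Nat) (g : PySem.Dict Int (PySem.Dict Int Int)),
    l.length - k = n → k ≤ l.length →
    (PySem.List.pyRange (k : Int) (PySem.List.len l)).foldl (fun g i =>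
      let g :=
        (PySem.List.pyRange (i + 1) (PySem.List.len l)).foldl (fun g j =>
          if PySem.List.pyGetD l j 0 > PySem.List.pyGetD l i 0 then
            let neighbour : PySem.Dict Int Int :=
              (PySem.Dict.empty).insert (PySem.List.pyGetD l j 0) 1
            if g.contains (PySem.List.pyGetD l i 0) then
              g.insert (PySem.List.pyGetD l i 0)
                ((g.getD (PySem.List.pyGetD l i 0) PySem.Dict.empty).update neighbour.items)
            else
              g.insert (PySem.List.pyGetD l i 0) neighbour
          else g) g
      if g.contains (PySem.List.pyGetD l i 0) then g
      else g.insert (PySem.List.pyGetD l i 0) PySem.Dict.empty) g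
    = goA g (l.drop k) := by
  intro n
  induction n with
  | zero =>
    intro k g hn hk
    have hkl : l.length = k := by omega
    rw [show PySem.List.pyRange (k : Int) (PySem.List.len l) = [] from
      PySem.List.pyRange_one_eq_nil (by simp [PySem.List.len, hkl]),
      List.drop_of_length_le (by omega)]
    rfl
  | succ n ih =>
    intro k g hn hk
    have hlt : k < l.length := by omega
    have hget : PySem.List.pyGetD l ((k : Int)) 0 = l[k] := by
      rw [PySem.List.pyGetD_natCast]; exact List.getD_eq_getElem l 0 hlt
    have hdrop : l.drop k = l[k] :: l.drop (k + 1) := List.drop_eq_getElem_cons hlt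
    rw [PySem.List.pyRange_one_cons (by simp [PySem.List.len]; exact_mod_cast hlt),
      List.foldl_cons, hdrop,
      show ((k : Int) + 1) = ((k + 1 : Nat) : Int) from by push_cast; ring,
      ih (k + 1) _ (by omega) (by omega)]
    show goA _ _ = goA (stepA g l[k] (l.drop (k + 1))) (l.drop (k + 1))
    congr 1
    simp only [hget]
    rw [fold_bodyA_pyGetD l l[k] _ g, inner_pyRangeA l l[k] (k + 1) g]
    rfl

lemma bridgeA0 (l : List Int) (g : PySem.Dict Int (PySem.Dict Int Int)) :
    (PySem.List.pyRange 0 (PySem.List.len l)).foldl (fun g i =>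
      let g :=
        (PySem.List.pyRange (i + 1) (PySem.List.len l)).foldl (fun g j =>
          if PySem.List.pyGetD l j 0 > PySem.List.pyGetD l i 0 then
            let neighbour : PySem.Dict Int Int :=
              (PySem.Dict.empty).insert (PySem.List.pyGetD l j 0) 1
            if g.contains (PySem.List.pyGetD l i 0) then
              g.insert (PySem.List.pyGetD l i 0)
                ((g.getD (PySem.List.pyGetD l i 0) PySem.Dict.empty).update neighbour.items)
            else
              g.insert (PySem.List.pyGetD l i 0) neighbour
          else g) g
      if g.contains (PySem.List.pyGetD l i 0) then g
      else g.insert (PySem.List.pyGetD l i 0) PySem.Dict.empty) g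
    = goA g l := by
  have h := bridgeA l l.length 0 g (by omega) (by omega)
  simpa using h

lemma A_eq (l : List Int) :
    sequence_to_dag l
    = (PySem.List.dedup l).map (fun v => (v, (innerD v (afterFirst l v)).items)) := by
  show List.map _ (PySem.Dict.items _) = _
  rw [bridgeA0 l PySem.Dict.empty,
    show (PySem.Dict.empty : PySem.Dict Int (PySem.Dict Int Int)) = GA l [] from rfl,
    goA_GA l l [] rfl]
  show ((PySem.List.dedup l).map _).map _ = _
  rw [List.map_map]
  rfl

-- B-side: the first-occurrence dict accumulates firstEnum
lemma firstItems (l : List Int) : ∀ (s : Int) (d : PySem.Dict Int Int),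
    ((PySem.List.enumerate l s).foldl
      (fun d p => if d.contains p.2 then d else d.insert p.2 p.1) d).items
    = d.items ++ (firstEnum l s).filter (fun p => !(d.contains p.1)) := by
  induction l with
  | nil => intro s d; simp [firstEnum, PySem.List.enumerate]
  | cons x r ih =>
    intro s d
    rw [PySem.List.enumerate_cons, List.foldl_cons]
    show ((PySem.List.enumerate r (s + 1)).foldl _
      (if d.contains x then d else d.insert x s)).items = _
    cases hc : d.contains x with
    | true =>
      rw [if_pos rfl, ih (s + 1) d]
      show _ = d.items ++ List.filter _ ((x, s) :: List.filter _ _)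
      rw [List.filter_cons_of_neg (by simp [hc]), List.filter_filter]
      congr 1
      apply List.filter_congr
      intro p _
      cases hb : d.contains p.1 with
      | true => simp [hb]
      | false =>
        have : p.1 ≠ x := fun e => by rw [e, hc] at hb; cases hb
        simp [hb, this]
    | false =>
      rw [if_neg (by simp [hc]), ih (s + 1) (d.insert x s),
        PySem.Dict.items_insert_of_not_contains _ _ hc]
      show _ = d.items ++ List.filter _ ((x, s) :: List.filter _ _)
      rw [List.filter_cons_of_pos (by simp [hc]), List.filter_filter, List.append_assoc]
      congr 1
      rw [List.singleton_append]
      congr 1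
      apply List.filter_congr
      intro p _
      rw [PySem.Dict.contains_insert]
      cases hb : d.contains p.1 <;> by_cases hx : p.1 = x <;> simp [hb, hx, bne]

lemma firstEnum_fst (l : List Int) : ∀ s : Int, (firstEnum l s).map Prod.fst = PySem.List.dedup l := by
  induction l with
  | nil => intro s; rfl
  | cons x r ih =>
    intro s
    show (x, s).1 :: ((firstEnum r (s + 1)).filter (fun p => p.1 != x)).map Prod.fst = _
    rw [show (fun p : Int × Int => p.1 != x) = (fun v : Int => v != x) ∘ Prod.fst from rfl,
      ← List.filter_map, ih (s + 1)]
    simp only [PySem.List.dedup_eq_ofList, PySem.Set.ofList_cons]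
    rfl

lemma firstEnum_spec (l : List Int) : ∀ (s : Int) (p : Int × Int), p ∈ firstEnum l s →
    ∃ k : Nat, p.2 = s + k ∧ l.drop (k + 1) = afterFirst l p.1 := by
  induction l with
  | nil => intro s p hp; cases hp
  | cons x r ih =>
    intro s p hp
    simp only [firstEnum, List.mem_cons, List.mem_filter] at hp
    rcases hp with rfl | ⟨hp, hne'⟩
    · exact ⟨0, by simp, by simp [afterFirst]⟩
    · have hne : p.1 ≠ x := by simpa using hne'
      obtain ⟨k, hk, hd⟩ := ih (s + 1) p hp
      refine ⟨k + 1, by push_cast at hk ⊢; omega, ?_⟩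
      show r.drop (k + 1) = _
      rw [hd]
      have hxp : ¬ (x = p.1) := fun e => hne e.symm
      simp [afterFirst, hxp]

-- an index loop over range(k, len(l)) reading l[j] is a fold over drop k (B's inner dict)
lemma inner_pyRangeB (l : List Int) (c : Int) (k : Nat) (d0 : PySem.Dict Int Int) :
    (PySem.List.pyRange ((k : Nat) : Int) (PySem.List.len l)).foldl (fun d j =>
        if PySem.List.pyGetD l j 0 > c then d.insert (PySem.List.pyGetD l j 0) 1 else d) d0
    = (l.drop k).foldl (fun d x => if x > c then d.insert x 1 else d) d0 := by
  rw [PySem.List.foldl_pyRange_pyGetD l 0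
    (fun d x => if x > c then d.insert x 1 else d) d0
    (a := ((k : Nat) : Int)) (by positivity), Int.toNat_natCast]

lemma B_eq (l : List Int) :
    sequence_to_dag_alt l
    = (PySem.List.dedup l).map (fun v => (v, (innerD v (afterFirst l v)).items)) := by
  show List.map _ (PySem.Dict.items _) = _
  rw [firstItems l 0 PySem.Dict.empty]
  have hempty : (PySem.Dict.empty : PySem.Dict Int Int).items
      ++ (firstEnum l 0).filter (fun p => !((PySem.Dict.empty : PySem.Dict Int Int).contains p.1))
      = firstEnum l 0 := by
    simp [show (PySem.Dict.empty : PySem.Dict Int Int).items = [] from rfl]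
  rw [hempty]
  refine (List.map_congr_left
    (g := (fun v : Int => (v, (innerD v (afterFirst l v)).items)) ∘ Prod.fst) ?_).trans ?_
  · intro p hp
    obtain ⟨k, hk, hd⟩ := firstEnum_spec l 0 p hp
    show (p.1, _) = (p.1, (innerD p.1 (afterFirst l p.1)).items)
    rw [hk]
    simp only [zero_add]
    rw [show ((k : Int) + 1) = ((k + 1 : Nat) : Int) from by push_cast; ring,
      inner_pyRangeB l p.1 (k + 1) PySem.Dict.empty, hd]
    have hfun : (fun (d : PySem.Dict Int Int) (x : Int) =>
        if x > p.1 then d.insert x 1 else d)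
        = (fun d x => if (fun y => decide (y > p.1)) x = true then d.insert x 1 else d) := by
      funext d x
      by_cases h : x > p.1 <;> simp [h]
    rw [hfun, ← List.foldl_filter]
    rfl
  · rw [← List.map_map, firstEnum_fst l 0]

-- ===== VERDICT (by name: the statement is the Claim_ definition above) =====
theorem sequence_to_dag_spec : Claim_equal_sequence_to_dag := by
  intro l _
  show sequence_to_dag l = sequence_to_dag_alt l
  rw [A_eq, B_eq]
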